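-- pv_equiv track=rewrite | github.com/akhil235556/prima | prima/route-planner/solvers/solver_v3/solution.py | _get_visit_index_to_pickup_map
-- ===== SOURCE A (Python) =====
-- def _get_visit_index_to_pickup_map(visit_order_list):
--     response = dict()
--     pickups = list()
--     for visit_index, visit_order in enumerate(visit_order_list):
--         if visit_order not in pickups:
--             response[visit_index] = True
--             pickups.append(visit_order)
--         else:
--             response[visit_index] = False
--     return response
-- ===== SOURCE B (Python) =====
-- def _get_visit_index_to_pickup_map(visit_order_list):
--     first_index = {}
--     for i, v in enumerate(visit_order_list):
--         if v not in first_index: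
--             first_index[v] = i
--     return {i: first_index[v] == i for i, v in enumerate(visit_order_list)}
-- ===== Notes on version B (the rewrite author's own statement) =====
-- stated objective: faster
-- what changed: Replaces the per-element linear membership scan over a growing pickups list with a first-occurrence index dict built in one pass, then derives each boolean by comparing the stored first index with the current index.
import Mathlib
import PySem

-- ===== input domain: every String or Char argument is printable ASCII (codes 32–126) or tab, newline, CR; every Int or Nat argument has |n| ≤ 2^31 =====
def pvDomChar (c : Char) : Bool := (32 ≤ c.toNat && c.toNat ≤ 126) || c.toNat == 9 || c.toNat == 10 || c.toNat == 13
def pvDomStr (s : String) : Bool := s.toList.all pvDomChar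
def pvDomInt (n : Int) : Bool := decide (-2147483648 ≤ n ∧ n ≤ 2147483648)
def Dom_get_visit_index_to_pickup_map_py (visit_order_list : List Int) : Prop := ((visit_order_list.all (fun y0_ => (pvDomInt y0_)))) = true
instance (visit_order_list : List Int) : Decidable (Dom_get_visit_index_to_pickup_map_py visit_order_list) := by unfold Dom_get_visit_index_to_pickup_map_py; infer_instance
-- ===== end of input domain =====

-- B replaces A's linear membership scan over the growing pickups list by a
-- first-occurrence-index dict built in one pass, deriving each boolean by an
-- index comparison (objective: faster, O(n*u) -> O(n)).

-- ===== PORT A =====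
-- loop body of A: membership test on the pickups list, then dict insert / append
def pvStepA (st : PySem.Dict Int Bool × List Int) (iv : Int × Int) : PySem.Dict Int Bool × List Int :=
  if !(st.2.contains iv.2) then (st.1.insert iv.1 true, st.2 ++ [iv.2])
  else (st.1.insert iv.1 false, st.2)

def get_visit_index_to_pickup_map_py (visit_order_list : List Int) : List (Int × Bool) :=
  (((PySem.List.enumerate visit_order_list 0).foldl pvStepA (PySem.Dict.empty, [])).1).items

-- ===== PORT B =====
-- first pass of B: record the index of each value's first occurrence
def pvStepB (d : PySem.Dict Int Int) (iv : Int × Int) : PySem.Dict Int Int :=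
  if !(d.contains iv.2) then d.insert iv.2 iv.1 else d

def get_visit_index_to_pickup_map_py_alt (visit_order_list : List Int) : List (Int × Bool) :=
  let fi := (PySem.List.enumerate visit_order_list 0).foldl pvStepB PySem.Dict.empty
  -- first_index[v] == i ; the key is always present, so the -1 default is unreachable
  (PySem.List.enumerate visit_order_list 0).map (fun iv => (iv.1, fi.getD iv.2 (-1) == iv.1))

-- ===== PRECONDITION & SPEC =====
def Spec_get_visit_index_to_pickup_map_py (visit_order_list : List Int) (out : List (Int × Bool)) : Prop := out = get_visit_index_to_pickup_map_py_alt visit_order_list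
instance (visit_order_list : List Int) (out : List (Int × Bool)) : Decidable (Spec_get_visit_index_to_pickup_map_py visit_order_list out) := by unfold Spec_get_visit_index_to_pickup_map_py; infer_instance

-- ===== CLAIM (what is proved, stated in full; the proofs are below) =====
def Claim_equal_get_visit_index_to_pickup_map_py : Prop := ∀ (visit_order_list : List Int), Dom_get_visit_index_to_pickup_map_py visit_order_list → Spec_get_visit_index_to_pickup_map_py visit_order_list (get_visit_index_to_pickup_map_py visit_order_list)

-- ===== LEMMAS AND PROOFS =====

-- reference shape of A's response: (index, is-first-occurrence-wrt-p) pairs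
def pvSpecA (s : Int) (p : List Int) : List Int → List (Int × Bool)
  | [] => []
  | v :: t => if !(p.contains v) then (s, true) :: pvSpecA (s + 1) (p ++ [v]) t
              else (s, false) :: pvSpecA (s + 1) p t

-- index (counting from s) of the first occurrence of x
def pvFirstIdx (s : Int) : List Int → Int → Option Int
  | [], _ => none
  | v :: t, x => if v == x then some s else pvFirstIdx (s + 1) t x

lemma pvFirstIdx_cons (s v x : Int) (t : List Int) :
    pvFirstIdx s (v :: t) x = if v == x then some s else pvFirstIdx (s + 1) t x := rfl

lemma pvLoopA_items (l : List Int) : ∀ (s : Int) (d : PySem.Dict Int Bool) (p : List Int),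
    (∀ k ∈ d.keys, k < s) →
    (((PySem.List.enumerate l s).foldl pvStepA (d, p)).1).items = d.items ++ pvSpecA s p l := by
  induction l with
  | nil => intro s d p _; simp [PySem.List.enumerate_nil, pvSpecA]
  | cons v t ih =>
    intro s d p hk
    have hcont : d.contains s = false := by
      rw [PySem.Dict.contains_eq_decide_mem_keys]
      simp only [decide_eq_false_iff_not]
      intro hm; exact absurd (hk s hm) (lt_irrefl s)
    have hk' : ∀ b, ∀ k ∈ (d.insert s b).keys, k < s + 1 := by
      intro b k hm
      rcases (PySem.Dict.mem_keys_insert _ _ _ _).1 hm with h | h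
      · omega
      · have := hk k h; omega
    rw [PySem.List.enumerate_cons]
    simp only [List.foldl_cons]
    by_cases hv : v ∈ p
    · have hstep : pvStepA (d, p) (s, v) = (d.insert s false, p) := by simp [pvStepA, hv]
      rw [hstep, ih (s + 1) _ p (hk' false), PySem.Dict.items_insert_of_not_contains _ _ hcont]
      simp [pvSpecA, hv]
    · have hstep : pvStepA (d, p) (s, v) = (d.insert s true, p ++ [v]) := by simp [pvStepA, hv]
      rw [hstep, ih (s + 1) _ (p ++ [v]) (hk' true), PySem.Dict.items_insert_of_not_contains _ _ hcont]
      simp [pvSpecA, hv]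

lemma pvSpecA_length (l : List Int) : ∀ (s : Int) (p : List Int), (pvSpecA s p l).length = l.length := by
  induction l with
  | nil => intro s p; simp [pvSpecA]
  | cons v t ih =>
    intro s p
    unfold pvSpecA
    by_cases hv : v ∈ p <;> simp [hv, ih]

lemma pvSpecA_getElem (l : List Int) : ∀ (k : Nat) (h : k < l.length) (s : Int) (p : List Int),
    (pvSpecA s p l)[k]'(by rw [pvSpecA_length]; exact h)
      = (s + (k : Int), !((p ++ l.take k).contains l[k])) := by
  induction l with
  | nil => intro k h; simp at h
  | cons v t ih =>
    intro k h s p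
    match k with
    | 0 =>
      unfold pvSpecA
      by_cases hv : v ∈ p <;> simp [hv]
    | k + 1 =>
      have ht : k < t.length := by simpa using h
      unfold pvSpecA
      by_cases hv : v ∈ p
      · simp only [hv, decide_true, List.contains_eq_mem, Bool.not_true, Bool.false_eq_true,
          if_false, List.getElem_cons_succ]
        rw [ih k ht (s + 1) p]
        simp only [Prod.mk.injEq]
        refine ⟨by push_cast; ring, ?_⟩
        have hiff : t[k] ∈ p ++ v :: t.take k ↔ t[k] ∈ p ++ t.take k := by
          simp only [List.mem_append, List.mem_cons]
          by_cases hy : t[k] = v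
          · subst hy; tauto
          · tauto
        simp [List.take_succ_cons, List.contains_eq_mem, hiff]
      · simp only [hv, decide_false, List.contains_eq_mem, Bool.not_false, if_true,
          List.getElem_cons_succ]
        rw [ih k ht (s + 1) (p ++ [v])]
        simp only [Prod.mk.injEq]
        refine ⟨by push_cast; ring, ?_⟩
        simp [List.take_succ_cons, List.append_assoc]

lemma pvFoldB_get (l : List Int) : ∀ (s : Int) (d : PySem.Dict Int Int) (x : Int),
    ((PySem.List.enumerate l s).foldl pvStepB d).get? x
      = match d.get? x with
        | some j => some j
        | none => pvFirstIdx s l x := by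
  induction l with
  | nil =>
    intro s d x
    simp only [PySem.List.enumerate_nil, List.foldl_nil, pvFirstIdx]
    cases d.get? x <;> rfl
  | cons v t ih =>
    intro s d x
    rw [PySem.List.enumerate_cons]
    simp only [List.foldl_cons]
    by_cases hc : d.contains v
    · have hstep : pvStepB d (s, v) = d := by simp [pvStepB, hc]
      rw [hstep, ih]
      cases hdx : d.get? x with
      | some j => rfl
      | none =>
        rw [pvFirstIdx_cons]
        by_cases hvx : v = x
        · subst hvx
          exfalso
          rw [PySem.Dict.contains_eq_isSome_get?, hdx] at hc
          simp at hc
        · simp [hvx]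
    · have hc' : d.contains v = false := eq_false_of_ne_true hc
      have hstep : pvStepB d (s, v) = d.insert v s := by simp [pvStepB, hc']
      rw [hstep, ih]
      by_cases hvx : v = x
      · subst hvx
        rw [PySem.Dict.get?_insert_self]
        rw [PySem.Dict.contains_eq_isSome_get?] at hc'
        cases hdx : d.get? v with
        | some j => rw [hdx] at hc'; simp at hc'
        | none => rw [pvFirstIdx_cons]; simp
      · rw [PySem.Dict.get?_insert_of_ne _ _ (Ne.symm hvx)]
        cases hdx : d.get? x with
        | some j => rfl
        | none => rw [pvFirstIdx_cons]; simp [hvx]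

-- first occurrence: no earlier copy → pvFirstIdx is exactly s + k
lemma pvFirstIdx_of_new (l : List Int) : ∀ (k : Nat) (h : k < l.length) (s : Int),
    l[k] ∉ l.take k → pvFirstIdx s l l[k] = some (s + (k : Int)) := by
  induction l with
  | nil => intro k h; simp at h
  | cons v t ih =>
    intro k h s hc
    match k with
    | 0 => simp [pvFirstIdx]
    | k + 1 =>
      have ht : k < t.length := by simpa using h
      simp only [List.take_succ_cons, List.getElem_cons_succ, List.mem_cons, not_or] at hc
      obtain ⟨hne, hmem⟩ := hc
      simp only [List.getElem_cons_succ]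
      rw [pvFirstIdx_cons]
      have hbe : (v == t[k]) = false := by simpa using fun h => hne h.symm
      rw [hbe]
      simp only [Bool.false_eq_true, if_false]
      rw [ih k ht (s + 1) hmem]
      congr 1
      push_cast; ring

-- earlier copy exists → pvFirstIdx lands strictly before s + k
lemma pvFirstIdx_of_dup (l : List Int) : ∀ (k : Nat) (h : k < l.length) (s : Int),
    l[k] ∈ l.take k →
    ∃ j, pvFirstIdx s l l[k] = some j ∧ j < s + (k : Int) := by
  induction l with
  | nil => intro k h; simp at h
  | cons v t ih =>
    intro k h s hc
    match k with
    | 0 => simp at hc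
    | k + 1 =>
      have ht : k < t.length := by simpa using h
      simp only [List.getElem_cons_succ]
      rw [pvFirstIdx_cons]
      by_cases hv : v = t[k]
      · subst hv
        simp only [BEq.rfl, if_true]
        exact ⟨s, rfl, by push_cast; omega⟩
      · have hbe : (v == t[k]) = false := by simpa using hv
        rw [hbe]
        simp only [Bool.false_eq_true, if_false]
        simp only [List.take_succ_cons, List.getElem_cons_succ, List.mem_cons] at hc
        have hmem : t[k] ∈ t.take k := by
          rcases hc with h1 | h2
          · exact absurd h1.symm hv
          · exact h2
        obtain ⟨j, hj, hjlt⟩ := ih k ht (s + 1) hmem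
        exact ⟨j, hj, by push_cast at hjlt ⊢; omega⟩

-- ===== VERDICT (by name: the statement is the Claim_ definition above) =====
theorem get_visit_index_to_pickup_map_py_spec : Claim_equal_get_visit_index_to_pickup_map_py := by
  intro l _
  unfold Spec_get_visit_index_to_pickup_map_py
  unfold get_visit_index_to_pickup_map_py get_visit_index_to_pickup_map_py_alt
  rw [pvLoopA_items l 0 PySem.Dict.empty [] (by simp [PySem.Dict.keys_empty])]
  have hemp : (PySem.Dict.empty : PySem.Dict Int Bool).items = [] := rfl
  rw [hemp, List.nil_append]
  apply List.ext_getElem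
  · rw [pvSpecA_length]
    simp [PySem.List.length_enumerate]
  · intro k h1 h2
    have hk : k < l.length := by rwa [pvSpecA_length] at h1
    rw [pvSpecA_getElem l k hk 0 []]
    rw [List.getElem_map, PySem.List.getElem_enumerate]
    dsimp only
    have hget : ((PySem.List.enumerate l 0).foldl pvStepB PySem.Dict.empty).get? l[k]
        = pvFirstIdx 0 l l[k] := by
      rw [pvFoldB_get]
      simp [PySem.Dict.get?_empty]
    rw [PySem.Dict.getD_eq_get?_getD, hget]
    by_cases hc : l[k] ∈ l.take k
    · obtain ⟨j, hj, hjlt⟩ := pvFirstIdx_of_dup l k hk 0 hc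
      rw [hj]
      have hne : ¬ j = (k : Int) := by omega
      simp [hc, hne]
    · rw [pvFirstIdx_of_new l k hk 0 hc]
      simp [hc]
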